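-- pv_equiv track=rewrite | github.com/JULIANJUAREZMX01/Wasm-Kalpixk_IA_DevOps | kalpixk_real_features.py | is_base64_present
-- ===== SOURCE A (Python) =====
-- def is_base64_present(raw: str) -> bool:
--     """Detectar payload base64 — secuencia >60 chars del charset base64"""
--     b64_chars = set("ABCDEFGHIJKLMNOPQRSTUVWXYZabcdefghijklmnopqrstuvwxyz0123456789+/=")
--     consecutive = 0
--     max_consecutive = 0
--     for c in raw:
--         if c in b64_chars:
--             consecutive += 1
--             max_consecutive = max(max_consecutive, consecutive)
--         else:
--             consecutive = 0
--     return max_consecutive > 60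
-- ===== SOURCE B (Python) =====
-- def is_base64_present(raw: str) -> bool:
--     """Detectar payload base64 — secuencia >60 chars del charset base64"""
--     b64_chars = set("ABCDEFGHIJKLMNOPQRSTUVWXYZabcdefghijklmnopqrstuvwxyz0123456789+/=")
--     i = 0
--     n = len(raw)
--     while i < n:
--         if raw[i] in b64_chars:
--             j = i + 1
--             while j < n and raw[j] in b64_chars:
--                 j += 1
--             if j - i > 60:
--                 return True
--             i = j
--         else:
--             i += 1
--     return False
-- ===== Notes on version B (the rewrite author's own statement) =====
-- stated objective: alternative
-- what changed: Replaces A's running consecutive/max_consecutive counter state machine (which always scans the whole string) with a two-pointer run scanner that extracts each maximal base64 run and returns True as soon as one run exceeds 60 characters.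
import Mathlib
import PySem

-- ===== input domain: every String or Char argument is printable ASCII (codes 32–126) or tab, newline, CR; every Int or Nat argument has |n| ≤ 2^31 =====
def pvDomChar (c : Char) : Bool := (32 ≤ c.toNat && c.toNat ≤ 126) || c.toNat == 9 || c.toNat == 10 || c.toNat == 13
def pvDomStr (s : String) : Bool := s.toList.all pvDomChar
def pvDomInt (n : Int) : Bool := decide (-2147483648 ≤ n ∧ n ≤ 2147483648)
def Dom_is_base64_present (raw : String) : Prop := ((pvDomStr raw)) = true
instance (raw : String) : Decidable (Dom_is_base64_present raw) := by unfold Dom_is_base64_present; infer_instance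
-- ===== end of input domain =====

-- B differs from A only in strategy (two-pointer maximal-run scan with early return
-- instead of A's consecutive/max_consecutive counters); return values are identical.

-- ===== PORT A =====
-- the 65-char base64 charset built by both programs (set(...) of the string literal)
def pvB64set : PySem.Set Char :=
  PySem.Set.ofList "ABCDEFGHIJKLMNOPQRSTUVWXYZabcdefghijklmnopqrstuvwxyz0123456789+/=".toList

def pvB64 (c : Char) : Bool := PySem.Set.contains pvB64set c

def is_base64_present (raw : String) : Bool :=
  decide ((raw.toList.foldl
    (fun (s : Int × Int) (c : Char) =>
      if pvB64 c then (s.1 + 1, max s.2 (s.1 + 1)) else (0, s.2))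
    (0, 0)).2 > 60)

-- ===== PORT B =====
-- inner while of Source B: advance j while j < n and raw[j] is a base64 char.
-- Fuel-based structural recursion: fuel only bounds the iteration count (callers pass
-- enough fuel for the loop to run to completion exactly as in Python); indexing is
-- total here since the loops keep the index within [0, n), so getD never hits its default.
def pvScanRun (l : List Char) (n : Nat) : Nat → Nat → Nat
  | 0, j => j
  | fuel + 1, j => if j < n ∧ pvB64 (l.getD j ' ') then pvScanRun l n fuel (j + 1) else j

-- outer while of Source B (i only advances, so n + 1 steps of fuel always suffice)
def pvMain (l : List Char) (n : Nat) : Nat → Nat → Bool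
  | 0, _ => false
  | fuel + 1, i =>
    if i < n then
      if pvB64 (l.getD i ' ') then
        if pvScanRun l n n (i + 1) - i > 60 then true
        else pvMain l n fuel (pvScanRun l n n (i + 1))
      else pvMain l n fuel (i + 1)
    else false

def is_base64_present_alt (raw : String) : Bool :=
  let l := raw.toList
  pvMain l l.length (l.length + 1) 0

-- ===== PRECONDITION & SPEC =====
def Spec_is_base64_present (raw : String) (out : Bool) : Prop := out = is_base64_present_alt raw
instance (raw : String) (out : Bool) : Decidable (Spec_is_base64_present raw out) := by unfold Spec_is_base64_present; infer_instance

-- ===== CLAIM (what is proved, stated in full; the proofs are below) =====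
def Claim_equal_is_base64_present : Prop := ∀ (raw : String), Dom_is_base64_present raw → Spec_is_base64_present raw (is_base64_present raw)

-- ===== LEMMAS AND PROOFS =====

-- pvF c l = the maximum consecutive-run counter reached when scanning l starting
-- with a current run of length c (a characterisation of A's fold state).
def pvF (c : Int) : List Char → Int
  | [] => c
  | x :: xs => if pvB64 x then pvF (c + 1) xs else max c (pvF 0 xs)

theorem pvF_ge (l : List Char) (c : Int) : c ≤ pvF c l := by
  induction l generalizing c with
  | nil => simp [pvF]
  | cons x xs ih =>
    simp only [pvF]
    split
    · have := ih (c + 1); omega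
    · omega

theorem pvFoldA (l : List Char) (c m : Int) (h0 : 0 ≤ c) (h : c ≤ m) :
    (l.foldl (fun (s : Int × Int) (c : Char) =>
      if pvB64 c then (s.1 + 1, max s.2 (s.1 + 1)) else (0, s.2)) (c, m)).2
    = max m (pvF c l) := by
  induction l generalizing c m with
  | nil => simp only [List.foldl_nil, pvF]; exact (max_eq_left h).symm
  | cons x xs ih =>
    simp only [List.foldl_cons, pvF]
    by_cases hx : pvB64 x
    · simp only [hx, if_true]
      rw [ih (c + 1) (max m (c + 1)) (by omega) (by omega)]
      have := pvF_ge xs (c + 1); omega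
    · simp only [hx, if_false, Bool.false_eq_true]
      rw [ih 0 m (by omega) (by omega), ← max_assoc, max_eq_left h]

-- pvF started at c ≥ 0 splits at the first maximal run
theorem pvF_split (l : List Char) (c : Int) (h : 0 ≤ c) :
    pvF c l = max (c + ((l.takeWhile pvB64).length : Int)) (pvF 0 (l.dropWhile pvB64)) := by
  induction l generalizing c with
  | nil => simp [pvF]; omega
  | cons x xs ih =>
    by_cases hx : pvB64 x
    · simp only [pvF, hx, if_true, List.takeWhile_cons, List.dropWhile_cons]
      rw [ih (c + 1) (by omega)]
      simp only [List.length_cons]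
      push_cast; omega
    · simp only [pvF, hx, if_false, Bool.false_eq_true, List.takeWhile_cons, List.dropWhile_cons,
        List.length_nil]
      have h0 := pvF_ge xs 0
      push_cast; omega

-- dropWhile = drop past the takeWhile prefix
theorem pvDropWhile_eq (l : List Char) :
    l.dropWhile pvB64 = l.drop (l.takeWhile pvB64).length := by
  induction l with
  | nil => simp
  | cons x xs ih =>
    by_cases hx : pvB64 x
    · simp [hx, ih]
    · simp [hx]

-- the inner scan computes the end index of the maximal run at j
theorem pvScanRun_eq (l : List Char) (fuel j : Nat) (hf : l.length - j ≤ fuel) :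
    pvScanRun l l.length fuel j = j + ((l.drop j).takeWhile pvB64).length := by
  induction fuel generalizing j with
  | zero =>
    have : l.length ≤ j := by omega
    rw [List.drop_eq_nil_of_le this]
    simp [pvScanRun]
  | succ fuel ih =>
    simp only [pvScanRun]
    by_cases hc : j < l.length ∧ pvB64 (l.getD j ' ') = true
    · obtain ⟨hj, hp⟩ := hc
      have hdrop : l.drop j = l[j] :: l.drop (j + 1) := List.drop_eq_getElem_cons hj
      have hget : l.getD j ' ' = l[j] := List.getD_eq_getElem l ' ' hj
      rw [hget] at hp
      rw [if_pos ⟨hj, by rw [hget]; exact hp⟩, ih (j + 1) (by omega), hdrop, List.takeWhile_cons]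
      simp only [hp, if_true, List.length_cons]
      omega
    · rw [if_neg hc]
      rcases Nat.lt_or_ge j l.length with hj | hj
      · have hdrop : l.drop j = l[j] :: l.drop (j + 1) := List.drop_eq_getElem_cons hj
        have hget : l.getD j ' ' = l[j] := List.getD_eq_getElem l ' ' hj
        have hp : ¬ (pvB64 l[j] = true) := by
          intro hx; exact hc ⟨hj, by rw [hget]; exact hx⟩
        rw [hdrop, List.takeWhile_cons]
        simp [hp]
      · rw [List.drop_eq_nil_of_le hj]; simp

-- the outer loop from index i decides whether the suffix has a run > 60
theorem pvMain_eq (l : List Char) (fuel i : Nat) (hf : l.length - i < fuel) :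
    pvMain l l.length fuel i = decide (pvF 0 (l.drop i) > 60) := by
  induction fuel generalizing i with
  | zero => omega
  | succ fuel ih =>
    simp only [pvMain]
    by_cases hi : i < l.length
    · rw [if_pos hi]
      by_cases hp : pvB64 (l.getD i ' ') = true
      · rw [if_pos hp]
        have hdrop : l.drop i = l[i] :: l.drop (i + 1) := List.drop_eq_getElem_cons hi
        have hget : l.getD i ' ' = l[i] := List.getD_eq_getElem l ' ' hi
        rw [hget] at hp
        have hjj : pvScanRun l l.length l.length (i + 1)
            = i + 1 + ((l.drop (i + 1)).takeWhile pvB64).length :=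
          pvScanRun_eq l l.length (i + 1) (by omega)
        have hF : pvF 0 (l.drop i) =
            max (1 + (((l.drop (i + 1)).takeWhile pvB64).length : Int))
              (pvF 0 ((l.drop (i + 1)).dropWhile pvB64)) := by
          rw [hdrop]; simp only [pvF, hp, if_true]
          rw [pvF_split _ (0 + 1) (by omega)]; norm_num
        by_cases hj : pvScanRun l l.length l.length (i + 1) - i > 60
        · rw [if_pos hj, hF]
          have := pvF_ge ((l.drop (i + 1)).dropWhile pvB64) 0
          symm; simp only [decide_eq_true_iff]; omega
        · rw [if_neg hj]
          have hdw : l.drop (pvScanRun l l.length l.length (i + 1))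
              = (l.drop (i + 1)).dropWhile pvB64 := by
            rw [pvDropWhile_eq, List.drop_drop, hjj]
          rw [ih _ (by omega), hdw, hF]
          simp only [decide_eq_decide]
          omega
      · rw [if_neg hp]
        have hdrop : l.drop i = l[i] :: l.drop (i + 1) := List.drop_eq_getElem_cons hi
        have hget : l.getD i ' ' = l[i] := List.getD_eq_getElem l ' ' hi
        rw [hget] at hp
        rw [ih (i + 1) (by omega), hdrop]
        have h0 := pvF_ge (l.drop (i + 1)) 0
        simp only [pvF, hp, if_false, Bool.false_eq_true]
        simp only [decide_eq_decide]
        omega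
    · rw [if_neg hi, List.drop_eq_nil_of_le (by omega)]
      simp [pvF]

-- ===== VERDICT (by name: the statement is the Claim_ definition above) =====
theorem is_base64_present_spec : Claim_equal_is_base64_present := by
  intro raw _
  unfold Spec_is_base64_present is_base64_present is_base64_present_alt
  rw [pvMain_eq raw.toList (raw.toList.length + 1) 0 (by omega), List.drop_zero,
    pvFoldA raw.toList 0 0 (by omega) (by omega)]
  have := pvF_ge raw.toList 0
  simp only [decide_eq_decide]
  omega
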